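-- pv_equiv track=rewrite | github.com/geekblack22/DataCodingRepo | Data Coding/main.py | removeAditional
-- ===== SOURCE A (Python) =====
-- def removeAditional(str,num, val):
--     for i in range(len(str)):
--         if(str[i] == val):
--             if(i-1 > -1):
--                 if(str[i -1].isnumeric()):
--                     num -= 1
--
--             if(i+1 < len(str)):
--                 if(str[i +1].isnumeric()):
--                     num -= 1
--     return num
-- ===== SOURCE B (Python) =====
-- def removeAditional(str, num, val):
--     # Index-set formulation: build the set of positions holding val and the set
--     # of numeric positions, then count matches by set intersection with the
--     # digit set shifted right/left -- no neighbor inspection during a scan.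
--     P = {i for i, c in enumerate(str) if c == val}
--     D = {i for i, c in enumerate(str) if c.isnumeric()}
--     after = {i + 1 for i in D}
--     before = {i - 1 for i in D}
--     return num - len(P & after) - len(P & before)
-- ===== Notes on version B (the rewrite author's own statement) =====
-- stated objective: alternative
-- what changed: Replaces A's single scan that anchors on val and inspects both neighbors with an index-set formulation: build the set of val positions and the set of numeric positions once, then obtain the decrement count as the sizes of the intersections of the val-position set with the digit-position set shifted by +1 and by -1.
import Mathlib
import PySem

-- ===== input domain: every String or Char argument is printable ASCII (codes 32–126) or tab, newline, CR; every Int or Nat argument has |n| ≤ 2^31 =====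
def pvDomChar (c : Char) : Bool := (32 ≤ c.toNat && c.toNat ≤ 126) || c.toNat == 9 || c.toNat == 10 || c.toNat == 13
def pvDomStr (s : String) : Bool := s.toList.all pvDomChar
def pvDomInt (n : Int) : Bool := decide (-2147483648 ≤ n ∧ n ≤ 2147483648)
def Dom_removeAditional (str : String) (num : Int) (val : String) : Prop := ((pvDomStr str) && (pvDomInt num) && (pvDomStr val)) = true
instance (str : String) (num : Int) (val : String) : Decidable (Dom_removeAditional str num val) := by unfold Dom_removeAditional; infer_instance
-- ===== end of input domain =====

-- B replaces A's neighbor-inspecting scan by an index-set formulation: build the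
-- position set of val and the set of numeric positions once, then count by set
-- intersection with the digit set shifted by ±1; alternative decomposition, same cost.

-- ===== PORT A =====
-- one iteration of A's index loop; neighbor accesses are guarded exactly as in A,
-- so getD never takes its default.  str[i].isnumeric() is ported as isdigit:
-- exact on the printable-ASCII domain.
def pvAStep (cs : List Char) (val : List Char) (num : Int) (i : Nat) : Int :=
  if [cs.getD i ' '] = val then
    let num := if (i : Int) - 1 > -1 ∧ PySem.Chars.isdigit (cs.getD (i - 1) ' ') then num - 1 else num
    if (i : Int) + 1 < (cs.length : Int) ∧ PySem.Chars.isdigit (cs.getD (i + 1) ' ') then num - 1 else num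
  else num

def removeAditional (str : String) (num : Int) (val : String) : Int :=
  (List.range str.toList.length).foldl (pvAStep str.toList val.toList) num

-- ===== PORT B =====
-- the two filtered set comprehensions over enumerate(str), the two shifted sets,
-- and the final set-intersection counts, exactly as in Source B
def removeAditional_alt (str : String) (num : Int) (val : String) : Int :=
  let P : PySem.Set Int :=
    PySem.Set.ofList (((PySem.List.enumerate str.toList).filter
      (fun p => decide ([p.2] = val.toList))).map (·.1))
  let D : PySem.Set Int :=
    PySem.Set.ofList (((PySem.List.enumerate str.toList).filter
      (fun p => PySem.Chars.isdigit p.2)).map (·.1))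
  let after : PySem.Set Int := PySem.Set.ofList (D.map (· + 1))
  let before : PySem.Set Int := PySem.Set.ofList (D.map (· - 1))
  num - PySem.Set.len (PySem.Set.inter P after) - PySem.Set.len (PySem.Set.inter P before)

-- ===== PRECONDITION & SPEC =====
def Spec_removeAditional (str : String) (num : Int) (val : String) (out : Int) : Prop := out = removeAditional_alt str num val
instance (str : String) (num : Int) (val : String) (out : Int) : Decidable (Spec_removeAditional str num val out) := by unfold Spec_removeAditional; infer_instance

-- ===== CLAIM =====
def Claim_equal_removeAditional : Prop := ∀ (str : String) (num : Int) (val : String), Dom_removeAditional str num val → Spec_removeAditional str num val (removeAditional str num val)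

-- ===== LEMMAS AND PROOFS =====

-- weight of the left-neighbor decrement taken at index i of A's loop
def pvL (cs : List Char) (val : List Char) (i : Nat) : Int :=
  if [cs.getD i ' '] = val ∧ 0 < i ∧ PySem.Chars.isdigit (cs.getD (i - 1) ' ') then 1 else 0

-- weight of the right-neighbor decrement taken at index i of A's loop
def pvR (cs : List Char) (val : List Char) (i : Nat) : Int :=
  if [cs.getD i ' '] = val ∧ i + 1 < cs.length ∧ PySem.Chars.isdigit (cs.getD (i + 1) ' ') then 1 else 0

lemma pvAStep_eq (cs val : List Char) (num : Int) (i : Nat) :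
    pvAStep cs val num i = num - (pvL cs val i + pvR cs val i) := by
  have c1 : ((i : Int) - 1 > -1) ↔ 0 < i := by omega
  have c2 : ((i : Int) + 1 < (cs.length : Int)) ↔ i + 1 < cs.length := by omega
  unfold pvAStep pvL pvR
  simp only [c1, c2]
  split_ifs <;> try omega
  all_goals (exfalso; tauto)

lemma pvFoldl_sub {α : Type} (f : α → Int) (l : List α) (num : Int) :
    l.foldl (fun a x => a - f x) num = num - (l.map f).sum := by
  induction l generalizing num with
  | nil => simp
  | cons x xs ih => simp [List.foldl_cons, ih]; ring

lemma pvSum_range (f : Nat → Int) (n : Nat) :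
    ((List.range n).map f).sum = ∑ i ∈ Finset.range n, f i := by
  induction n with
  | zero => simp
  | succ n ih => simp [List.range_succ, Finset.sum_range_succ, ih]

-- A's result as num minus two index sums
lemma pvA_closed (cs val : List Char) (num : Int) :
    (List.range cs.length).foldl (pvAStep cs val) num
      = num - (∑ i ∈ Finset.range cs.length, pvL cs val i)
            - (∑ i ∈ Finset.range cs.length, pvR cs val i) := by
  have hA : pvAStep cs val
      = fun a i => a - (fun i => pvL cs val i + pvR cs val i) i := by
    funext a i; exact pvAStep_eq _ _ _ _
  rw [hA, pvFoldl_sub, pvSum_range, Finset.sum_add_distrib]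
  ring

-- the index list extracted from a filtered enumerate, as a filtered range
lemma pvEnumFilter (cs : List Char) (q : Int × Char → Bool) :
    ((PySem.List.enumerate cs).filter q).map (·.1)
      = ((List.range cs.length).filter
          (fun (k : Nat) => q ((k : Int), cs.getD k ' '))).map (fun (k : Nat) => (k : Int)) := by
  rw [PySem.List.enumerate_eq_map_pyRange cs ' ', PySem.List.pyRange_one]
  simp [List.filter_map, List.map_map, Function.comp_def, PySem.List.pyGetD_natCast]

lemma pvNodup_mapcast (l : List Nat) (h : l.Nodup) :
    (l.map (fun (k : Nat) => (k : Int))).Nodup :=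
  h.map (fun a b hab => by omega)

lemma pvMem_mapcast_filter (p : Nat → Bool) (n : Nat) (x : Int) :
    x ∈ ((List.range n).filter p).map (fun (k : Nat) => (k : Int))
      ↔ 0 ≤ x ∧ x < (n : Int) ∧ p x.toNat = true := by
  simp only [List.mem_map, List.mem_filter, List.mem_range]
  constructor
  · rintro ⟨m, ⟨hm, hp⟩, rfl⟩
    refine ⟨by omega, by omega, by simpa using hp⟩
  · rintro ⟨h0, hn, hp⟩
    exact ⟨x.toNat, ⟨by omega, hp⟩, by omega⟩

-- length of a filtered range as a 0/1 sum
lemma pvLen_filter_range (p : Nat → Bool) (n : Nat) :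
    ((((List.range n).filter p).length : Int))
      = ∑ k ∈ Finset.range n, (if p k then (1 : Int) else 0) := by
  induction n with
  | zero => simp
  | succ n ih =>
    rw [List.range_succ, List.filter_append, Finset.sum_range_succ, ← ih]
    by_cases h : p n <;> simp [h]

theorem removeAditional_spec : Claim_equal_removeAditional := by
  intro str num val _
  unfold Spec_removeAditional removeAditional removeAditional_alt
  set cs := str.toList with hcs
  set v := val.toList with hv
  set n := cs.length with hn
  -- name the boolean index predicates
  set tP : Nat → Bool := fun k => decide ([cs.getD k ' '] = v) with htP
  set tD : Nat → Bool := fun k => PySem.Chars.isdigit (cs.getD k ' ') with htD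
  -- P and D as concrete index lists
  have hPlist : ((PySem.List.enumerate cs).filter
      (fun p => decide ([p.2] = v))).map (·.1)
      = ((List.range n).filter tP).map (fun (k : Nat) => (k : Int)) := pvEnumFilter cs _
  have hDlist : ((PySem.List.enumerate cs).filter
      (fun p => PySem.Chars.isdigit p.2)).map (·.1)
      = ((List.range n).filter tD).map (fun (k : Nat) => (k : Int)) := pvEnumFilter cs _
  have hPnd : (((List.range n).filter tP).map (fun (k : Nat) => (k : Int))).Nodup :=
    pvNodup_mapcast _ (List.nodup_range.filter _)
  have hDnd : (((List.range n).filter tD).map (fun (k : Nat) => (k : Int))).Nodup :=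
    pvNodup_mapcast _ (List.nodup_range.filter _)
  simp only [hPlist, hDlist,
    PySem.Set.ofList_eq_self_of_nodup _ hPnd, PySem.Set.ofList_eq_self_of_nodup _ hDnd]
  set Dl : List Int := ((List.range n).filter tD).map (fun (k : Nat) => (k : Int)) with hDl
  have haftnd : (Dl.map (· + 1)).Nodup := hDnd.map (fun a b hab => by omega)
  have hbefnd : (Dl.map (· - 1)).Nodup := hDnd.map (fun a b hab => by omega)
  simp only [PySem.Set.ofList_eq_self_of_nodup _ haftnd,
    PySem.Set.ofList_eq_self_of_nodup _ hbefnd]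
  -- intersections are filters of P by membership
  have hinter : ∀ (s t : List Int),
      PySem.Set.inter s t = s.filter (fun a => PySem.Set.contains t a) := fun _ _ => rfl
  have hlen : ∀ (s : List Int), PySem.Set.len s = (s.length : Int) := fun _ => rfl
  rw [hinter, hinter, hlen, hlen]
  -- push the membership filter into the range filter
  have hfilter : ∀ (S : List Int),
      ((((List.range n).filter tP).map (fun (k : Nat) => (k : Int))).filter
          (fun a => PySem.Set.contains S a))
        = ((List.range n).filter
            (fun k => tP k && PySem.Set.contains S (k : Int))).map (fun (k : Nat) => (k : Int)) := by
    intro S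
    rw [List.filter_map, List.filter_filter]
    simp only [Function.comp_def]
    exact congrArg (List.map _) (List.filter_congr (fun a _ => Bool.and_comm _ _))
  rw [hfilter, hfilter]
  simp only [List.length_map]
  rw [pvLen_filter_range, pvLen_filter_range]
  have hAcl := pvA_closed cs v num
  rw [← hn] at hAcl
  rw [hAcl]
  -- pointwise identification of the two 0/1 sums with Σ pvL and Σ pvR
  have hmemD : ∀ (x : Int), PySem.Set.contains Dl x = true
      ↔ 0 ≤ x ∧ x < (n : Int) ∧ tD x.toNat = true := by
    intro x
    rw [PySem.Set.contains_iff, hDl, pvMem_mapcast_filter]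
  have hsumL : (∑ k ∈ Finset.range n,
      (if tP k && PySem.Set.contains (Dl.map (· + 1)) (k : Int) then (1 : Int) else 0))
      = ∑ i ∈ Finset.range n, pvL cs v i := by
    refine Finset.sum_congr rfl (fun k hk => ?_)
    have hkn : k < n := Finset.mem_range.mp hk
    have hmem : PySem.Set.contains (Dl.map (· + 1)) (k : Int) = true
        ↔ (0 < k ∧ tD (k - 1) = true) := by
      rw [PySem.Set.contains_iff, List.mem_map]
      constructor
      · rintro ⟨j, hj, hj1⟩
        have := (hmemD j).mp (by rw [PySem.Set.contains_iff]; exact hj)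
        obtain ⟨h0, hn', hd⟩ := this
        have hjk : j = (k : Int) - 1 := by omega
        have : j.toNat = k - 1 := by omega
        exact ⟨by omega, this ▸ hd⟩
      · rintro ⟨h0, hd⟩
        refine ⟨((k - 1 : Nat) : Int), ?_, by omega⟩
        have := (hmemD ((k - 1 : Nat) : Int)).mpr ⟨by omega, by omega, by simpa using hd⟩
        rw [PySem.Set.contains_iff] at this; exact this
    unfold pvL
    by_cases hP : [cs.getD k ' '] = v
    · by_cases hcond : 0 < k ∧ tD (k - 1) = true
      · have hb : PySem.Set.contains (Dl.map (· + 1)) (k : Int) = true := hmem.mpr hcond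
        have hcL : (tP k && PySem.Set.contains (Dl.map (· + 1)) (k : Int)) = true := by
          rw [Bool.and_eq_true]
          exact ⟨by rw [htP]; exact decide_eq_true hP, hb⟩
        have hdL : PySem.Chars.isdigit (cs.getD (k - 1) ' ') = true := by
          have h2 := hcond.2; rw [htD] at h2; exact h2
        rw [if_pos hcL, if_pos ⟨hP, hcond.1, hdL⟩]
      · have hcL : ¬ ((tP k && PySem.Set.contains (Dl.map (· + 1)) (k : Int)) = true) := by
          rw [Bool.and_eq_true]
          rintro ⟨-, hcontains⟩
          exact hcond (hmem.mp hcontains)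
        have hpL : ¬ ([cs.getD k ' '] = v ∧ 0 < k ∧
            PySem.Chars.isdigit (cs.getD (k - 1) ' ') = true) := by
          rintro ⟨-, h0, hd⟩
          refine hcond ⟨h0, ?_⟩
          rw [htD]; exact hd
        rw [if_neg hcL, if_neg hpL]
    · have hcL : ¬ ((tP k && PySem.Set.contains (Dl.map (· + 1)) (k : Int)) = true) := by
        rw [Bool.and_eq_true]
        rintro ⟨htk, -⟩
        rw [htP] at htk
        exact hP (of_decide_eq_true htk)
      have hpL : ¬ ([cs.getD k ' '] = v ∧ 0 < k ∧
          PySem.Chars.isdigit (cs.getD (k - 1) ' ') = true) := fun h => hP h.1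
      rw [if_neg hcL, if_neg hpL]
  have hsumR : (∑ k ∈ Finset.range n,
      (if tP k && PySem.Set.contains (Dl.map (· - 1)) (k : Int) then (1 : Int) else 0))
      = ∑ i ∈ Finset.range n, pvR cs v i := by
    refine Finset.sum_congr rfl (fun k hk => ?_)
    have hkn : k < n := Finset.mem_range.mp hk
    have hmem : PySem.Set.contains (Dl.map (· - 1)) (k : Int) = true
        ↔ (k + 1 < n ∧ tD (k + 1) = true) := by
      rw [PySem.Set.contains_iff, List.mem_map]
      constructor
      · rintro ⟨j, hj, hj1⟩
        have := (hmemD j).mp (by rw [PySem.Set.contains_iff]; exact hj)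
        obtain ⟨h0, hn', hd⟩ := this
        have : j.toNat = k + 1 := by omega
        exact ⟨by omega, this ▸ hd⟩
      · rintro ⟨hlt, hd⟩
        refine ⟨((k + 1 : Nat) : Int), ?_, by omega⟩
        have := (hmemD ((k + 1 : Nat) : Int)).mpr ⟨by omega, by omega, by simpa using hd⟩
        rw [PySem.Set.contains_iff] at this; exact this
    unfold pvR
    by_cases hP : [cs.getD k ' '] = v
    · by_cases hcond : k + 1 < n ∧ tD (k + 1) = true
      · have hb : PySem.Set.contains (Dl.map (· - 1)) (k : Int) = true := hmem.mpr hcond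
        have hcR : (tP k && PySem.Set.contains (Dl.map (· - 1)) (k : Int)) = true := by
          rw [Bool.and_eq_true]
          exact ⟨by rw [htP]; exact decide_eq_true hP, hb⟩
        have hdR : PySem.Chars.isdigit (cs.getD (k + 1) ' ') = true := by
          have h2 := hcond.2; rw [htD] at h2; exact h2
        rw [if_pos hcR, if_pos ⟨hP, hn ▸ hcond.1, hdR⟩]
      · have hcR : ¬ ((tP k && PySem.Set.contains (Dl.map (· - 1)) (k : Int)) = true) := by
          rw [Bool.and_eq_true]
          rintro ⟨-, hcontains⟩
          exact hcond (hmem.mp hcontains)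
        have hpR : ¬ ([cs.getD k ' '] = v ∧ k + 1 < cs.length ∧
            PySem.Chars.isdigit (cs.getD (k + 1) ' ') = true) := by
          rintro ⟨-, hlt, hd⟩
          refine hcond ⟨hn ▸ hlt, ?_⟩
          rw [htD]; exact hd
        rw [if_neg hcR, if_neg hpR]
    · have hcR : ¬ ((tP k && PySem.Set.contains (Dl.map (· - 1)) (k : Int)) = true) := by
        rw [Bool.and_eq_true]
        rintro ⟨htk, -⟩
        rw [htP] at htk
        exact hP (of_decide_eq_true htk)
      have hpR : ¬ ([cs.getD k ' '] = v ∧ k + 1 < cs.length ∧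
          PySem.Chars.isdigit (cs.getD (k + 1) ' ') = true) := fun h => hP h.1
      rw [if_neg hcR, if_neg hpR]
  rw [hsumL, hsumR]
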